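-- pv_equiv track=rewrite | github.com/bm6177807-cmyk/ege-bot | handlers/tools.py | _sort_genotype
-- ===== SOURCE A (Python) =====
-- from collections import Counter, defaultdict
--
-- def _sort_genotype(alleles: str) -> str:
--     """Нормализовать генотип: для каждого локуса — заглавная буква перед строчной."""
--     loci: dict = defaultdict(list)
--     for c in alleles:
--         loci[c.lower()].append(c)
--     result = []
--     for letter in sorted(loci.keys()):
--         result.extend(sorted(loci[letter], key=lambda x: x.islower()))
--     return "".join(result)
-- ===== SOURCE B (Python) =====
-- def _sort_genotype(alleles: str) -> str:
--     # One stable sort with a composite key: primary = lowercased char (locus),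
--     # secondary = islower (False < True, so uppercase comes first per locus).
--     return "".join(sorted(alleles, key=lambda c: (c.lower(), c.islower())))
-- ===== Notes on version B (the rewrite author's own statement) =====
-- stated objective: simpler
-- what changed: Replaced the defaultdict grouping plus two-level loop (sort keys, then sort and concatenate each bucket) by a single stable sort of the characters with the composite key (c.lower(), c.islower()).
import Mathlib
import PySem

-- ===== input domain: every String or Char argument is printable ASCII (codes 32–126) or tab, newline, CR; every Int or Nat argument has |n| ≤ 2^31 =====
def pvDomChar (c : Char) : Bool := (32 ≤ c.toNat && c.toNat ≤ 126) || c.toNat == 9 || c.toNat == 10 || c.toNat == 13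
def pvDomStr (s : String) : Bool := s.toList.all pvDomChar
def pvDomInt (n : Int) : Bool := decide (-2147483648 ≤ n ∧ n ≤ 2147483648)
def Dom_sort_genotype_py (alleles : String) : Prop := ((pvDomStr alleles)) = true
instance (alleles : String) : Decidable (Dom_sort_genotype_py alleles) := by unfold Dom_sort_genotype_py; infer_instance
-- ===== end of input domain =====

-- B replaces A's defaultdict grouping + per-bucket sorting by ONE stable sort with
-- the composite key (c.lower(), c.islower()); same return value, simpler decomposition.

-- ===== PORT A =====
def sort_genotype_py (alleles : String) : String :=
  -- loci = defaultdict(list); for c in alleles: loci[c.lower()].append(c)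
  let loci : PySem.Dict Char (List Char) :=
    alleles.toList.foldl
      (fun d c => d.modify (PySem.Chars.lowerChar c) [] (fun xs => xs ++ [c]))
      PySem.Dict.empty
  -- result = []; for letter in sorted(loci.keys()): result.extend(sorted(loci[letter], key=lambda x: x.islower()))
  let result : List Char :=
    (PySem.List.sorted loci.keys (fun x => x)).foldl
      (fun acc letter =>
        acc ++ PySem.List.sorted (loci.getD letter []) (fun x => PySem.Chars.islower x)) []
  -- return "".join(result)  (joining one-character strings)
  String.ofList (PySem.Chars.join [] (result.map (fun c => [c])))

-- ===== PORT B =====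
def sort_genotype_py_alt (alleles : String) : String :=
  -- return "".join(sorted(alleles, key=lambda c: (c.lower(), c.islower())))
  String.ofList (PySem.Chars.join []
    ((PySem.List.sorted2 alleles.toList
        (fun c => PySem.Chars.lowerChar c) (fun c => PySem.Chars.islower c)).map (fun c => [c])))

-- ===== PRECONDITION & SPEC =====
def Spec_sort_genotype_py (alleles : String) (out : String) : Prop := out = sort_genotype_py_alt alleles
instance (alleles : String) (out : String) : Decidable (Spec_sort_genotype_py alleles out) := by unfold Spec_sort_genotype_py; infer_instance

-- ===== CLAIM (what is proved, stated in full; the proofs are below) =====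
def Claim_equal_sort_genotype_py : Prop := ∀ (alleles : String), Dom_sort_genotype_py alleles → Spec_sort_genotype_py alleles (sort_genotype_py alleles)

-- ===== LEMMAS AND PROOFS =====

-- The composite sort key, packed into one Nat: lexicographic on (lowercased char, islower).
def pvKey (c : Char) : Nat :=
  2 * (PySem.Chars.lowerChar c).toNat + (if PySem.Chars.islower c then 1 else 0)

theorem pv_char_lt_iff (a b : Char) : a < b ↔ a.toNat < b.toNat := Iff.rfl

theorem pv_char_eq_of_toNat (a b : Char) (h : a.toNat = b.toNat) : a = b :=
  Char.ext (UInt32.toNat_inj.mp h)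

theorem pv_islower_iff (c : Char) :
    PySem.Chars.islower c = true ↔ 97 ≤ c.toNat ∧ c.toNat ≤ 122 := by
  simp [PySem.Chars.islower, Char.le_def]
  rfl

theorem pv_isupper_iff (c : Char) :
    PySem.Chars.isupper c = true ↔ 65 ≤ c.toNat ∧ c.toNat ≤ 90 := by
  simp [PySem.Chars.isupper, Char.le_def]
  rfl

theorem pv_toNat_ofNat (n : Nat) (h : n < 55296) : (Char.ofNat n).toNat = n := by
  unfold Char.ofNat
  rw [dif_pos (Or.inl h : Nat.isValidChar n)]
  simp [Char.toNat, Char.ofNatAux]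

theorem pv_toNat_lowerChar (c : Char) :
    (PySem.Chars.lowerChar c).toNat =
      if 65 ≤ c.toNat ∧ c.toNat ≤ 90 then c.toNat + 32 else c.toNat := by
  unfold PySem.Chars.lowerChar
  by_cases h : 65 ≤ c.toNat ∧ c.toNat ≤ 90
  · rw [if_pos ((pv_isupper_iff c).mpr h), if_pos h]
    exact pv_toNat_ofNat _ (by omega)
  · rw [if_neg (fun hu => h ((pv_isupper_iff c).mp hu)), if_neg h]

theorem pvKey_inj : Function.Injective pvKey := by
  intro a b h
  unfold pvKey at h
  have hla := pv_toNat_lowerChar a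
  have hlb := pv_toNat_lowerChar b
  have hia := pv_islower_iff a
  have hib := pv_islower_iff b
  apply pv_char_eq_of_toNat
  cases ha : PySem.Chars.islower a <;> cases hb : PySem.Chars.islower b <;>
    rw [ha] at h hia <;> rw [hb] at h hib <;> simp at h hia hib <;>
    split_ifs at hla hlb <;> omega

-- B's composite-pair comparison is exactly the strict order of pvKey.
theorem pv_lt2_eq :
    (fun a b : Char =>
        decide (PySem.Chars.lowerChar a < PySem.Chars.lowerChar b) ||
          (!decide (PySem.Chars.lowerChar b < PySem.Chars.lowerChar a) &&
            decide (PySem.Chars.islower a < PySem.Chars.islower b))) =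
      fun a b => decide (pvKey a < pvKey b) := by
  funext a b
  rw [Bool.eq_iff_iff]
  simp only [Bool.or_eq_true, Bool.and_eq_true, Bool.not_eq_eq_eq_not, Bool.not_true,
    decide_eq_true_eq, decide_eq_false_iff_not, pv_char_lt_iff, Bool.lt_iff, pvKey]
  cases PySem.Chars.islower a <;> cases PySem.Chars.islower b <;> simp <;> omega

-- B's double-keyed stable sort IS the stable sort by pvKey.
theorem pv_alt_eq_sorted (xs : List Char) :
    PySem.List.sorted2 xs (fun c => PySem.Chars.lowerChar c) (fun c => PySem.Chars.islower c) =
      PySem.List.sorted xs pvKey := by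
  rw [PySem.List.sorted_eq_foldl_insertBy]
  unfold PySem.List.sorted2
  simp only [if_neg (by decide : ¬(false = true))]
  rw [pv_lt2_eq]

-- A's grouping loop: bucket of k = the subsequence of characters whose lowercase is k.
theorem pv_bucket (l : List Char) (k : Char) :
    (l.foldl (fun d c => d.modify (PySem.Chars.lowerChar c) [] (fun xs => xs ++ [c]))
        PySem.Dict.empty).getD k [] =
      l.filter (fun c => PySem.Chars.lowerChar c == k) := by
  have h := PySem.Dict.getD_foldl_modify_append
    (l.map (fun c => (PySem.Chars.lowerChar c, c))) PySem.Dict.empty k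
  rw [List.foldl_map] at h
  simpa [List.filter_map, Function.comp_def] using h

theorem pv_keys_nodup (l : List Char) :
    (l.foldl (fun d c => d.modify (PySem.Chars.lowerChar c) [] (fun xs => xs ++ [c]))
        PySem.Dict.empty).keys.Nodup :=
  PySem.Dict.nodup_keys_foldl_modify_key l (fun c => PySem.Chars.lowerChar c) []
    (fun _ c => fun xs => xs ++ [c]) PySem.Dict.empty (by simp)

theorem pv_mem_keys (l : List Char) (c : Char) (hc : c ∈ l) :
    PySem.Chars.lowerChar c ∈
      (l.foldl (fun d c => d.modify (PySem.Chars.lowerChar c) [] (fun xs => xs ++ [c]))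
        PySem.Dict.empty).keys := by
  rw [PySem.Dict.keys_foldl_modify_key l (fun c => PySem.Chars.lowerChar c) []
    (fun _ c => fun xs => xs ++ [c]) PySem.Dict.empty]
  rw [PySem.Set.mem_update]
  exact Or.inr (List.mem_map_of_mem hc)

-- A nodup list of keys covering l splits l into its fibres (as a permutation).
theorem pv_flat_perm (key : Char → Char) :
    ∀ (ks l : List Char), ks.Nodup → (∀ c ∈ l, key c ∈ ks) →
      (ks.flatMap (fun k => l.filter (fun c => key c == k))).Perm l := by
  intro ks
  induction ks with
  | nil =>
    intro l _ hcov
    cases l with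
    | nil => simp
    | cons c t => exact absurd (hcov c (by simp)) (by simp)
  | cons k ks ih =>
    intro l hnd hcov
    rw [List.flatMap_cons]
    have hrest : ks.flatMap (fun k' => l.filter (fun c => key c == k')) =
        ks.flatMap (fun k' => (l.filter (fun c => !(key c == k))).filter
          (fun c => key c == k')) := by
      apply List.flatMap_congr
      intro k' hk'
      rw [List.filter_filter]
      apply List.filter_congr
      intro c _
      cases hck : (key c == k') <;> simp at hck ⊢
      intro hck2
      exact (List.nodup_cons.mp hnd).1 (by rw [← hck, hck2] at hk'; exact hk')
    rw [hrest]
    have hperm := ih (l.filter (fun c => !(key c == k))) (List.nodup_cons.mp hnd).2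
      (by
        intro c hc
        rcases List.mem_filter.mp hc with ⟨hcl, hck⟩
        rcases List.mem_cons.mp (hcov c hcl) with h | h
        · simp [h] at hck
        · exact h)
    exact (List.Perm.append_left _ hperm).trans (List.filter_append_perm _ l)

-- Concatenating the islower-sorted buckets in increasing key order is pvKey-ordered.
theorem pv_flat_pairwise :
    ∀ (ks : List Char) (g : Char → List Char),
      ks.Pairwise (· < ·) →
      (∀ k ∈ ks, ∀ c ∈ g k, PySem.Chars.lowerChar c = k) →
      (∀ k ∈ ks, (g k).Pairwise (fun a b => pvKey a ≤ pvKey b)) →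
      (ks.flatMap g).Pairwise (fun a b => pvKey a ≤ pvKey b) := by
  intro ks
  induction ks with
  | nil => intro g _ _ _; simp
  | cons k ks ih =>
    intro g hlt hmem hin
    rw [List.flatMap_cons]
    rw [List.pairwise_append]
    refine ⟨hin k (by simp), ih g (List.pairwise_cons.mp hlt).2
      (fun k' hk' => hmem k' (by simp [hk'])) (fun k' hk' => hin k' (by simp [hk'])), ?_⟩
    intro a ha b hb
    rcases List.mem_flatMap.mp hb with ⟨k', hk', hbk'⟩
    have h1 : PySem.Chars.lowerChar a = k := hmem k (by simp) a ha
    have h2 : PySem.Chars.lowerChar b = k' := hmem k' (by simp [hk']) b hbk'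
    have h3 : k < k' := (List.pairwise_cons.mp hlt).1 k' hk'
    rw [pv_char_lt_iff] at h3
    unfold pvKey
    rw [h1, h2]
    split_ifs <;> omega

-- islower-sorted within a single bucket is pvKey-sorted there.
theorem pv_bucket_pairwise (l : List Char) (k : Char) :
    (PySem.List.sorted (l.filter (fun c => PySem.Chars.lowerChar c == k))
        (fun x => PySem.Chars.islower x)).Pairwise (fun a b => pvKey a ≤ pvKey b) := by
  have hp := PySem.List.sorted_pairwise (l.filter (fun c => PySem.Chars.lowerChar c == k))
    (fun x => PySem.Chars.islower x)
  apply hp.imp_of_mem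
  intro a b ha hb hle
  have ha' : PySem.Chars.lowerChar a = k := by
    have := (List.mem_filter.mp ((PySem.List.mem_sorted _ _ _ _).mp ha)).2; simpa using this
  have hb' : PySem.Chars.lowerChar b = k := by
    have := (List.mem_filter.mp ((PySem.List.mem_sorted _ _ _ _).mp hb)).2; simpa using this
  unfold pvKey
  rw [ha', hb']
  cases hx : PySem.Chars.islower a <;> cases hy : PySem.Chars.islower b <;>
    rw [hx, hy] at hle <;> simp at hle ⊢
  exact absurd hle (by decide)

-- ===== VERDICT (by name: the statement is the Claim_ definition above) =====
theorem sort_genotype_py_spec : Claim_equal_sort_genotype_py := by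
  intro alleles _
  unfold Spec_sort_genotype_py sort_genotype_py sort_genotype_py_alt
  dsimp only
  set l := alleles.toList with hl
  -- name A's dictionary and key list
  set loci := l.foldl (fun d c => d.modify (PySem.Chars.lowerChar c) [] (fun xs => xs ++ [c]))
    PySem.Dict.empty with hloci
  set ks := PySem.List.sorted loci.keys (fun x => x) with hks
  -- A's loop as a flatMap of its sorted buckets
  have hA : (ks.foldl
      (fun acc letter =>
        acc ++ PySem.List.sorted (loci.getD letter []) (fun x => PySem.Chars.islower x)) []) =
      ks.flatMap (fun k =>
        PySem.List.sorted (l.filter (fun c => PySem.Chars.lowerChar c == k))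
          (fun x => PySem.Chars.islower x)) := by
    rw [PySem.List.foldl_append_eq_flatMap]
    rw [List.nil_append]
    apply List.flatMap_congr
    intro k _
    rw [hloci, pv_bucket]
  rw [hA, pv_alt_eq_sorted]
  -- both sides are permutations of l, pairwise-ordered by the injective key pvKey
  have hknodup : ks.Nodup := (PySem.List.sorted_perm loci.keys (fun x => x) false).symm.nodup
    (pv_keys_nodup l)
  have hAperm : (ks.flatMap (fun k =>
      PySem.List.sorted (l.filter (fun c => PySem.Chars.lowerChar c == k))
        (fun x => PySem.Chars.islower x))).Perm l := by
    refine List.Perm.trans ?_ (pv_flat_perm (fun c => PySem.Chars.lowerChar c) ks l hknodup ?_)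
    · exact List.Perm.flatMap_left ks (fun k _ => PySem.List.sorted_perm _ _ _)
    · intro c hc
      exact (PySem.List.mem_sorted _ _ _ _).mpr (pv_mem_keys l c hc)
  have hApair : (ks.flatMap (fun k =>
      PySem.List.sorted (l.filter (fun c => PySem.Chars.lowerChar c == k))
        (fun x => PySem.Chars.islower x))).Pairwise (fun a b => pvKey a ≤ pvKey b) := by
    apply pv_flat_pairwise
    · have hp := PySem.List.sorted_pairwise loci.keys (fun x => x)
      have : ks.Pairwise (fun a b : Char => a ≤ b ∧ a ≠ b) :=
        List.Pairwise.and ((hks ▸ hp : ks.Pairwise (fun a b => a ≤ b))) hknodup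
      exact this.imp (fun h => lt_of_le_of_ne h.1 h.2)
    · intro k _ c hc
      have := (List.mem_filter.mp ((PySem.List.mem_sorted _ _ _ _).mp hc)).2
      simpa using this
    · intro k _
      exact pv_bucket_pairwise l k
  have hBperm := PySem.List.sorted_perm l pvKey false
  have hBpair := PySem.List.sorted_pairwise l pvKey
  have hEq : (ks.flatMap (fun k =>
      PySem.List.sorted (l.filter (fun c => PySem.Chars.lowerChar c == k))
        (fun x => PySem.Chars.islower x))) = PySem.List.sorted l pvKey :=
    PySem.List.eq_of_perm_of_pairwise_le_of_injective pvKey pvKey_inj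
      (hAperm.trans hBperm.symm) hApair hBpair
  rw [hEq]
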